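/- GENERATED by mk_final_copies.py from the proof of the farm's unit `decode_residue.6a` (farm:decode_residue.6a.1: Proof.lean) as the
   re-elaboration sweep compiled it — do not edit. -/
import Vorbis.Spec.Units.decode_residue_6a
import Vorbis.Spec.Worked.decode_residue_6a_Lemmas

open X86 X86.User Asan Vorbis Vorbis.Spec Vorbis.Spec.DecodeResidue

/-- Unit `decode_residue.6a`: the `while` head 2212 (`head_walk`: two checked loads, `z`, `cdq ; idiv ch`, the dispatch on `pass`), the
i-loop's entry (`inner_init`) and the loop condition of the i-loop 2229 (`loop_cond`), as the three walks of Lemmas.lean (the worker of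
decode_residue.6, attempt 1). -/
theorem Vorbis.Spec.Worked.decode_residue_6a_ok : Vorbis.Spec.decode_residue_6a.Statement := by
  intro Lay hLay μ hμ u₀ hcode h_load4
  intro g hent
  refine ⟨?_, ?_, ?_⟩
  · intro pass cs pcount v hat
    exact Vorbis.Spec.decode_residue_6a.head_walk Lay hLay μ hμ u₀ hcode h_load4 g hent pass cs pcount v hat
  · intro pass cs pcount v hat
    exact Vorbis.Spec.decode_residue_6a.inner_init Lay hLay μ hμ u₀ hcode g hent pass cs pcount v hat
  · intro pass cs i pcount v hat
    exact Vorbis.Spec.decode_residue_6a.loop_cond Lay hLay μ hμ u₀ hcode g hent pass cs i pcount v hat
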